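-- pv_equiv track=rewrite | github.com/rahul18cracker/common-investor | backend/app/nlp/research_agent/harness/grounding.py | has_negated_claim
-- ===== SOURCE A (Python) =====
-- NEGATION_WINDOW = 4
--
-- NEGATION_WORDS = frozenset(
--     [
--         "not",
--         "no",
--         "isn't",
--         "isnt",
--         "aren't",
--         "arent",
--         "wasn't",
--         "wasnt",
--         "hasn't",
--         "hasnt",
--         "without",
--         "lack",
--         "lacks",
--         "lacking",
--         "neither",
--         "never",
--         "barely",
--         "hardly",
--         "unlikely",
--         "despite",
--     ]
-- )
--
-- def has_negated_claim(text: str, signals: list[str]) -> bool: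
--     """Check if signal words appear but are negated."""
--     text_lower = text.lower()
--     words = text_lower.split()
--     for signal in signals:
--         signal_lower = signal.lower()
--         for i, word in enumerate(words):
--             if signal_lower in word:
--                 window_start = max(0, i - NEGATION_WINDOW)
--                 preceding = words[window_start:i]
--                 if any(w in NEGATION_WORDS for w in preceding):
--                     return True
--     return False
-- ===== SOURCE B (Python) =====
-- NEGATION_WINDOW = 4
--
-- NEGATION_WORDS = frozenset(
--     [
--         "not", "no", "isn't", "isnt", "aren't", "arent", "wasn't", "wasnt",
--         "hasn't", "hasnt", "without", "lack", "lacks", "lacking", "neither",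
--         "never", "barely", "hardly", "unlikely", "despite",
--     ]
-- )
--
--
-- def has_negated_claim(text: str, signals: list[str]) -> bool:
--     """Single pass over the words: remember the index of the most recent
--     negation word; a word is 'negated' when that index is within the
--     strictly-preceding NEGATION_WINDOW words."""
--     sigs = [s.lower() for s in signals]
--     last = None  # index of the most recent negation word seen so far
--     for i, word in enumerate(text.lower().split()):
--         if last is not None and i - last <= NEGATION_WINDOW \
--                 and any(s in word for s in sigs):
--             return True
--         if word in NEGATION_WORDS:
--             last = i
--     return False
-- ===== Notes on version B (the rewrite author's own statement) =====
-- stated objective: faster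
-- what changed: B replaces A's per-signal rescan of all words (re-slicing the preceding 4-word window at every match) with one linear pass that remembers the index of the last negation word and runs the substring tests only at words within the window of that index.
import Mathlib
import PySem

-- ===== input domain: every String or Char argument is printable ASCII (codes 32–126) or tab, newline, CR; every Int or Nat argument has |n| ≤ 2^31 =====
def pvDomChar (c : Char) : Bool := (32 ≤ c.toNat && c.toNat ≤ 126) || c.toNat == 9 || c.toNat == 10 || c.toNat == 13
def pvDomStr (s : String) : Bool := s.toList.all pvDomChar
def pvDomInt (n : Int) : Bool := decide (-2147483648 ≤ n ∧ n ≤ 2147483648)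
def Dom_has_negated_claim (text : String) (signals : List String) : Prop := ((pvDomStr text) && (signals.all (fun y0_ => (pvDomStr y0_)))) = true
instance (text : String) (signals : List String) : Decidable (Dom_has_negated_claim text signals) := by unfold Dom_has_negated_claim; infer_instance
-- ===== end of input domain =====

-- B: one linear pass remembering the last negation-word index instead of re-slicing the
-- preceding window for every signal (alternative decomposition; same observable result).


-- ===== PORT A =====
def negationWords : List String :=
  ["not", "no", "isn't", "isnt", "aren't", "arent", "wasn't", "wasnt",
   "hasn't", "hasnt", "without", "lack", "lacks", "lacking", "neither",
   "never", "barely", "hardly", "unlikely", "despite"]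

def has_negated_claim (text : String) (signals : List String) : Bool :=
  let words := PySem.Str.split₀ (PySem.Str.lower text)
  signals.any (fun signal =>
    let signalLower := PySem.Str.lower signal
    (PySem.List.enumerate words 0).any (fun p =>
      PySem.Str.isIn signalLower p.2 &&
      (PySem.List.slice words (some (max 0 (p.1 - 4))) (some p.1)).any
        (fun w => negationWords.contains w)))

-- ===== PORT B =====
-- the enumerate loop of Source B: i is the running index, last the most recent negation index
def altLoop (sigs : List String) : List String → Int → Option Int → Bool
  | [], _, _ => false
  | word :: rest, i, last =>
    if (match last with
        | some l => decide (i - l ≤ 4)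
        | none => false) && sigs.any (fun s => PySem.Str.isIn s word)
    then true
    else altLoop sigs rest (i + 1) (if negationWords.contains word then some i else last)

def has_negated_claim_alt (text : String) (signals : List String) : Bool :=
  altLoop (signals.map PySem.Str.lower) (PySem.Str.split₀ (PySem.Str.lower text)) 0 none

-- ===== PRECONDITION & SPEC =====
def Spec_has_negated_claim (text : String) (signals : List String) (out : Bool) : Prop := out = has_negated_claim_alt text signals
instance (text : String) (signals : List String) (out : Bool) : Decidable (Spec_has_negated_claim text signals out) := by unfold Spec_has_negated_claim; infer_instance

-- ===== CLAIM (what is proved, stated in full; the proofs are below) =====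
def Claim_equal_has_negated_claim : Prop := ∀ (text : String) (signals : List String), Dom_has_negated_claim text signals → Spec_has_negated_claim text signals (has_negated_claim text signals)

-- ===== LEMMAS AND PROOFS =====

/-- some word strictly within the 4-word window before index `i` is a negation word -/
def NegBefore (ws : List String) (i : Nat) : Prop :=
  ∃ j, j < i ∧ i ≤ j + 4 ∧ negationWords.contains (ws.getD j "") = true

/-- the common characterisation both ports are reduced to -/
def SpecP (ws : List String) (sigs : List String) : Prop :=
  ∃ i, i < ws.length ∧ (∃ s ∈ sigs, PySem.Str.isIn s (ws.getD i "") = true) ∧ NegBefore ws i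

/-- spec-side reference value of B's `last` after the first `k` words -/
def lastNeg (ws : List String) : Nat → Option Int
  | 0 => none
  | k + 1 => if negationWords.contains (ws.getD k "") then some (k : Int) else lastNeg ws k

lemma lastNeg_none_iff (ws : List String) (k : Nat) :
    lastNeg ws k = none ↔ ∀ j < k, negationWords.contains (ws.getD j "") = false := by
  induction k with
  | zero => simp [lastNeg]
  | succ k ih =>
    simp only [lastNeg]
    split_ifs with h
    · constructor
      · intro hc; cases hc
      · intro hall
        have hc := hall k (by omega); rw [h] at hc; cases hc
    · rw [ih]
      constructor
      · intro hall j hj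
        rcases Nat.lt_succ_iff_lt_or_eq.mp hj with hj' | rfl
        · exact hall j hj'
        · exact Bool.eq_false_iff.mpr h
      · intro hall j hj; exact hall j (by omega)

lemma lastNeg_some_iff (ws : List String) (k : Nat) (l : Int) :
    lastNeg ws k = some l ↔
      ∃ ln : Nat, l = (ln : Int) ∧ ln < k ∧ negationWords.contains (ws.getD ln "") = true ∧
        ∀ j, ln < j → j < k → negationWords.contains (ws.getD j "") = false := by
  induction k with
  | zero => simp [lastNeg]
  | succ k ih =>
    simp only [lastNeg]
    split_ifs with h
    · constructor
      · intro hc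
        refine ⟨k, by simpa using hc.symm, by omega, h, ?_⟩
        intro j hj1 hj2; omega
      · rintro ⟨ln, rfl, hlt, hneg, hmax⟩
        by_cases hk : ln = k
        · subst hk; rfl
        · have hc := hmax k (by omega) (by omega); rw [h] at hc; cases hc
    · rw [ih]
      constructor
      · rintro ⟨ln, rfl, hlt, hneg, hmax⟩
        refine ⟨ln, rfl, by omega, hneg, ?_⟩
        intro j hj1 hj2
        rcases Nat.lt_succ_iff_lt_or_eq.mp hj2 with hj' | rfl
        · exact hmax j hj1 hj'
        · exact Bool.eq_false_iff.mpr h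
      · rintro ⟨ln, rfl, hlt, hneg, hmax⟩
        have hlk : ln ≠ k := by rintro rfl; exact absurd hneg h
        exact ⟨ln, rfl, by omega, hneg, fun j h1 h2 => hmax j h1 (by omega)⟩

/-- B's window flag computed from `lastNeg` is exactly `NegBefore`. -/
lemma flag_iff (ws : List String) (k : Nat) :
    ((match lastNeg ws k with
      | some l => decide ((k : Int) - l ≤ 4)
      | none => false) = true) ↔ NegBefore ws k := by
  cases hl : lastNeg ws k with
  | none =>
    rw [lastNeg_none_iff] at hl
    simp only [NegBefore]
    constructor
    · intro hc; cases hc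
    · rintro ⟨j, hj1, _, hneg⟩
      have hc := hl j hj1; rw [hneg] at hc; cases hc
  | some l =>
    rw [lastNeg_some_iff] at hl
    rcases hl with ⟨ln, rfl, hlt, hneg, hmax⟩
    simp only [decide_eq_true_eq, NegBefore]
    constructor
    · intro h; exact ⟨ln, hlt, by omega, hneg⟩
    · rintro ⟨j, hj1, hj2, hjneg⟩
      have : j ≤ ln := by
        by_contra hc
        have hf := hmax j (by omega) hj1; rw [hjneg] at hf; cases hf
      omega

/-- main invariant for B's loop -/
lemma altLoop_iff (sigs ws : List String) (k : Nat) (hk : k ≤ ws.length) :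
    altLoop sigs (ws.drop k) (k : Int) (lastNeg ws k) = true ↔
      ∃ i, k ≤ i ∧ i < ws.length ∧
        (∃ s ∈ sigs, PySem.Str.isIn s (ws.getD i "") = true) ∧ NegBefore ws i := by
  induction hfuel : ws.length - k generalizing k with
  | zero =>
    have : ws.drop k = [] := by
      apply List.drop_eq_nil_of_le; omega
    rw [this]
    simp only [altLoop]
    constructor
    · intro hc; cases hc
    · rintro ⟨i, h1, h2, _⟩; omega
  | succ n ih =>
    have hklt : k < ws.length := by omega
    have hdrop : ws.drop k = ws[k] :: ws.drop (k + 1) :=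
      List.drop_eq_getElem_cons hklt
    rw [hdrop]
    simp only [altLoop]
    have hgetD : ws.getD k "" = ws[k] := List.getD_eq_getElem ws "" hklt
    have hlast : (if negationWords.contains ws[k] then some (k : Int) else lastNeg ws k)
        = lastNeg ws (k + 1) := by
      simp only [lastNeg, hgetD]
    by_cases hflag : ((match lastNeg ws k with
        | some l => decide ((k : Int) - l ≤ 4)
        | none => false) && sigs.any (fun s => PySem.Str.isIn s ws[k])) = true
    · simp only [hflag, if_true]
      rw [Bool.and_eq_true, List.any_eq_true] at hflag
      obtain ⟨hf, s, hs, hsin⟩ := hflag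
      constructor
      · intro _
        exact ⟨k, le_refl k, hklt, ⟨s, hs, by rwa [hgetD]⟩, (flag_iff ws k).mp hf⟩
      · intro _; trivial
    · simp only [hflag, Bool.false_eq_true, if_false]
      have hcast : (k : Int) + 1 = ((k + 1 : Nat) : Int) := by push_cast; ring
      rw [hlast, hcast, ih (k + 1) (by omega) (by omega)]
      constructor
      · rintro ⟨i, h1, h2, h3, h4⟩; exact ⟨i, by omega, h2, h3, h4⟩
      · rintro ⟨i, h1, h2, h3, h4⟩
        have hik : i ≠ k := by
          rintro rfl
          apply hflag
          rw [Bool.and_eq_true, List.any_eq_true]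
          rcases h3 with ⟨s, hs, hsin⟩
          exact ⟨(flag_iff ws i).mpr h4, s, hs, by rwa [hgetD] at hsin⟩
        exact ⟨i, by omega, h2, h3, h4⟩

lemma alt_iff_spec (text : String) (signals : List String) :
    has_negated_claim_alt text signals = true ↔
      SpecP (PySem.Str.split₀ (PySem.Str.lower text)) (signals.map PySem.Str.lower) := by
  unfold has_negated_claim_alt SpecP
  have h := altLoop_iff (signals.map PySem.Str.lower)
      (PySem.Str.split₀ (PySem.Str.lower text)) 0 (by omega)
  simp only [List.drop_zero, Nat.cast_zero, lastNeg] at h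
  rw [h]
  constructor
  · rintro ⟨i, _, h2, h3, h4⟩; exact ⟨i, h2, h3, h4⟩
  · rintro ⟨i, h2, h3, h4⟩; exact ⟨i, Nat.zero_le i, h2, h3, h4⟩

/-- membership in A's preceding-window slice -/
lemma mem_slice_iff (ws : List String) (i : Nat) (hi : i < ws.length) (w : String) :
    w ∈ PySem.List.slice ws (some (max 0 ((i : Int) - 4))) (some (i : Int)) ↔
      ∃ j, j < i ∧ i ≤ j + 4 ∧ ws.getD j "" = w := by
  have ha : (0 : Int) ≤ max 0 ((i : Int) - 4) := le_max_left _ _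
  rw [PySem.List.slice_toNat ws ha (by positivity)]
  have htn : (max 0 ((i : Int) - 4)).toNat = i - 4 := by omega
  have hin : (i : Int).toNat = i := by omega
  rw [htn, hin]
  rw [List.mem_iff_getElem]
  constructor
  · rintro ⟨m, hm, heq⟩
    have hm1 : m < i - (i - 4) := by
      have := hm; simp [List.length_take, List.length_drop] at this; omega
    have hm2 : i - 4 + m < ws.length := by omega
    refine ⟨i - 4 + m, by omega, by omega, ?_⟩
    rw [List.getD_eq_getElem ws "" hm2]
    rw [List.getElem_take, List.getElem_drop] at heq
    exact heq
  · rintro ⟨j, hj1, hj2, heq⟩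
    have hjlen : j < ws.length := by omega
    refine ⟨j - (i - 4), ?_, ?_⟩
    · simp [List.length_take, List.length_drop]; omega
    · rw [List.getElem_take, List.getElem_drop]
      rw [List.getD_eq_getElem ws "" hjlen] at heq
      rw [← heq]
      congr 1
      omega

lemma a_inner_iff (ws : List String) (signals : List String) :
    (signals.any (fun signal =>
      let signalLower := PySem.Str.lower signal
      (PySem.List.enumerate ws 0).any (fun p =>
        PySem.Str.isIn signalLower p.2 &&
        (PySem.List.slice ws (some (max 0 (p.1 - 4))) (some p.1)).any
          (fun w => negationWords.contains w)))) = true ↔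
      SpecP ws (signals.map PySem.Str.lower) := by
  unfold SpecP
  simp only [List.any_eq_true, Bool.and_eq_true, PySem.List.mem_enumerate_iff]
  constructor
  · rintro ⟨signal, hsig, p, ⟨k, hk, rfl⟩, hin, w, hw, hwneg⟩
    simp only [zero_add] at hin hw
    refine ⟨k, hk, ⟨PySem.Str.lower signal, List.mem_map_of_mem hsig, ?_⟩, ?_⟩
    · rwa [List.getD_eq_getElem ws "" hk]
    · rcases (mem_slice_iff ws k hk w).mp hw with ⟨j, hj1, hj2, hjw⟩
      exact ⟨j, hj1, hj2, by rwa [hjw]⟩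
  · rintro ⟨i, hi, ⟨s, hs, hsin⟩, j, hj1, hj2, hjneg⟩
    rcases List.mem_map.mp hs with ⟨signal, hsig, rfl⟩
    refine ⟨signal, hsig, ((i : Int), ws[i]), ⟨i, hi, by simp⟩, ?_, ?_⟩
    · rwa [List.getD_eq_getElem ws "" hi] at hsin
    · exact ⟨ws.getD j "", (mem_slice_iff ws i hi _).mpr ⟨j, hj1, hj2, rfl⟩, hjneg⟩

lemma a_iff_spec (text : String) (signals : List String) :
    has_negated_claim text signals = true ↔
      SpecP (PySem.Str.split₀ (PySem.Str.lower text)) (signals.map PySem.Str.lower) := by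
  unfold has_negated_claim
  exact a_inner_iff _ signals

-- ===== VERDICT (by name: the statement is the Claim_ definition above) =====
theorem has_negated_claim_spec : Claim_equal_has_negated_claim := by
  intro text signals _
  unfold Spec_has_negated_claim
  have := (a_iff_spec text signals).trans (alt_iff_spec text signals).symm
  cases ha : has_negated_claim text signals with
  | true => exact (this.mp ha).symm
  | false =>
    cases hb : has_negated_claim_alt text signals with
    | true => exact absurd (this.mpr hb) (by simp [ha])
    | false => rfl
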